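-- pv_equiv track=rewrite | github.com/sodabeans/Algorithm | Programmers/Level 2/86971.py | dfs
-- ===== SOURCE A (Python) =====
-- def dfs(curr, graph, visited):
--     visited[curr] = True
--     cnt = 1
--     for node in graph[curr]:
--         if not visited[node]:
--             visited[node] = True
--             cnt += dfs(node, graph, visited)
--     return cnt
-- ===== SOURCE B (Python) =====
-- def dfs(curr, graph, visited):
--     visited[curr] = True
--     cnt = 1
--     stack = [(curr, 0)]
--     while stack:
--         node, i = stack.pop()
--         adj = graph[node]
--         if i < len(adj):
--             stack.append((node, i + 1))
--             nb = adj[i]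
--             if not visited[nb]:
--                 visited[nb] = True
--                 cnt += 1
--                 stack.append((nb, 0))
--     return cnt
-- ===== Notes on version B (the rewrite author's own statement) =====
-- stated objective: alternative
-- what changed: Replaces A's recursive DFS with an iterative DFS over an explicit stack of (node, next-neighbor-index) frames, so no recursion at all; same visit order, same count, same visited mutation.
import Mathlib
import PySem

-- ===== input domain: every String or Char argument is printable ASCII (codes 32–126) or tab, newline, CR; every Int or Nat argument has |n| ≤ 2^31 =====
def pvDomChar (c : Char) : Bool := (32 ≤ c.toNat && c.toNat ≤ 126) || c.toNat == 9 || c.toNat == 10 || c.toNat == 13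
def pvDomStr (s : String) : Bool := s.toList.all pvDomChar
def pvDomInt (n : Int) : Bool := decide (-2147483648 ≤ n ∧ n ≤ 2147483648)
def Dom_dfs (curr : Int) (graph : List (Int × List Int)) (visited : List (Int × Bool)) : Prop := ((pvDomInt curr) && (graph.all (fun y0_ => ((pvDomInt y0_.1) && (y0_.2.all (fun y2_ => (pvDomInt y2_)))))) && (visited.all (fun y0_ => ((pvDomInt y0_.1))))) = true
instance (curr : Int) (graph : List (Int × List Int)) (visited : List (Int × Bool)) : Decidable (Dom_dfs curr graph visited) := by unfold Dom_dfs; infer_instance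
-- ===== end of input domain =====

-- B replaces A's recursive DFS by an iterative DFS over an explicit stack of (node, next-neighbor-index)
-- frames (same visit order, same count); in Python both A and B mutate `visited` identically — the
-- theorems below are about the RETURN value.

-- ===== PORT A =====
-- number of entries currently mapped to False (termination measure / fuel bound only, not part of A's logic)
def fcnt (d : PySem.Dict Int Bool) : Nat := d.items.countP (fun p => p.2 == false)

-- countP facts about inserting `true`, needed by the termination measures of both ports
theorem countP_lt_of_mem {α : Type} {p q : α → Bool} {l : List α} {a : α}
    (ha : a ∈ l) (hqa : q a = true) (hpa : p a = false)
    (hmono : ∀ x ∈ l, p x = true → q x = true) :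
    l.countP p < l.countP q := by
  obtain ⟨l1, l2, rfl⟩ := List.append_of_mem ha
  have h1 : l1.countP p ≤ l1.countP q :=
    List.countP_mono_left (fun x hx => hmono x (by simp [hx]))
  have h2 : l2.countP p ≤ l2.countP q :=
    List.countP_mono_left (fun x hx => hmono x (by simp [hx]))
  simp [List.countP_append, hqa, hpa]
  omega

theorem fcnt_insert_true_lt (d : PySem.Dict Int Bool) (k : Int)
    (h : d.getD k true = false) : fcnt (d.insert k true) < fcnt d := by
  have hget : d.get? k = some false := by
    rcases hg : d.get? k with _ | b
    · rw [PySem.Dict.getD_of_get?_eq_none _ _ hg] at h; cases h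
    · rw [PySem.Dict.getD_of_get?_eq_some _ _ hg] at h; rw [h]
  have hmem : (k, false) ∈ d.items := PySem.Dict.mem_items_of_get?_eq_some _ hget
  have hc : d.contains k = true := by
    rw [PySem.Dict.contains_eq_isSome_get?, hget]; rfl
  unfold fcnt
  rw [PySem.Dict.items_insert_of_contains _ _ hc, List.countP_map]
  apply countP_lt_of_mem hmem
  · rfl
  · simp [Function.comp]
  · intro x hx
    by_cases hk : x.1 == k <;> simp [hk, Function.comp]

-- A's recursion, transliterated; `fuel` bounds the recursion depth (fcnt visited + 1 is always enough:
-- every nested call starts with strictly fewer False entries, see `stabA`).  Missing keys (Python: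
-- KeyError, excluded by Pre_dfs) read as [] / True here.
mutual
def dfsA (g : PySem.Dict Int (List Int)) : Nat → Int → PySem.Dict Int Bool → Int × PySem.Dict Int Bool
  | 0, _, vis => (0, vis)                                   -- fuel exhausted; unreachable from the wrapper
  | d+1, curr, vis => goA g d (g.getD curr []) (vis.insert curr true) 1
termination_by d _ _ => (d, 0, 0)
def goA (g : PySem.Dict Int (List Int)) : Nat → List Int → PySem.Dict Int Bool → Int → Int × PySem.Dict Int Bool
  | _, [], vis, cnt => (cnt, vis)
  | d, n :: rest, vis, cnt =>
      if (vis.getD n true) = false then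
        let r := dfsA g d n (vis.insert n true)
        goA g d rest r.2 (cnt + r.1)
      else goA g d rest vis cnt
termination_by d l _ _ => (d, 1, l.length)
end

def dfs (curr : Int) (graph : List (Int × List Int)) (visited : List (Int × Bool)) : Int :=
  let g := PySem.Dict.ofList graph
  let vis := PySem.Dict.ofList visited
  (dfsA g (fcnt vis + 1) curr vis).1

-- ===== PORT B =====
-- stack-frame weight: 1 + remaining neighbors of each frame (termination measure only)
def wt (g : PySem.Dict Int (List Int)) (s : List (Int × Nat)) : Nat :=
  (s.map (fun p => 1 + ((g.getD p.1 []).length - p.2))).sum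

-- B's while-loop; the Python stack's top is the head of the list here
def loopB (g : PySem.Dict Int (List Int)) : List (Int × Nat) → PySem.Dict Int Bool → Int → Int
  | [], _, cnt => cnt
  | (node, i) :: s, vis, cnt =>
      if h : i < (g.getD node []).length then
        if hv : (vis.getD (g.getD node [])[i] true) = false then
          loopB g (((g.getD node [])[i], 0) :: (node, i+1) :: s) (vis.insert (g.getD node [])[i] true) (cnt + 1)
        else
          loopB g ((node, i+1) :: s) vis cnt
      else
        loopB g s vis cnt
termination_by s vis _ => (fcnt vis, wt g s)
decreasing_by
  · exact Prod.Lex.left _ _ (fcnt_insert_true_lt _ _ hv)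
  · apply Prod.Lex.right; simp only [wt, List.map_cons, List.sum_cons]; omega
  · apply Prod.Lex.right; simp only [wt, List.map_cons, List.sum_cons]; omega

def dfs_alt (curr : Int) (graph : List (Int × List Int)) (visited : List (Int × Bool)) : Int :=
  let g := PySem.Dict.ofList graph
  let vis := (PySem.Dict.ofList visited).insert curr true
  loopB g [(curr, 0)] vis 1

-- ===== PRECONDITION & SPEC =====
-- Pre_dfs excludes exactly the KeyError inputs of A: it asks that curr be a graph key and that every
-- node the search can reach (the bounded fixed point below — reachability of the input graph through
-- initially-unvisited nodes, not a run of either port) be a graph key with all its neighbors visited-keys.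
def reachStep (g : PySem.Dict Int (List Int)) (vis : PySem.Dict Int Bool) (curr : Int)
    (S : PySem.Set Int) : PySem.Set Int :=
  S.foldl (fun acc x => (g.getD x []).foldl
    (fun acc n => if vis.getD n true = false ∧ n ≠ curr then PySem.Set.add acc n else acc) acc) S

def Pre_dfs (curr : Int) (graph : List (Int × List Int)) (visited : List (Int × Bool)) : Prop :=
  let g := PySem.Dict.ofList graph
  let vis := PySem.Dict.ofList visited
  let S := (fun S => reachStep g vis curr S)^[graph.length + visited.length + 1]
    (PySem.Set.ofList [curr])
  curr ∈ g.keys ∧ ∀ x ∈ S, x ∈ g.keys ∧ ∀ n ∈ g.getD x [], n ∈ vis.keys ∨ n = curr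
instance (curr : Int) (graph : List (Int × List Int)) (visited : List (Int × Bool)) : Decidable (Pre_dfs curr graph visited) := by unfold Pre_dfs; infer_instance

def pvWitness_dfs : Int × (List (Int × List Int)) × (List (Int × Bool)) :=
  (0, [(0, [1]), (1, [0])], [(0, false), (1, false)])

def Spec_dfs (curr : Int) (graph : List (Int × List Int)) (visited : List (Int × Bool)) (out : Int) : Prop := out = dfs_alt curr graph visited
instance (curr : Int) (graph : List (Int × List Int)) (visited : List (Int × Bool)) (out : Int) : Decidable (Spec_dfs curr graph visited out) := by unfold Spec_dfs; infer_instance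

-- ===== CLAIM (what is proved, stated in full; the proofs are below) =====
def Claim_equal_dfs : Prop := ∀ (curr : Int) (graph : List (Int × List Int)) (visited : List (Int × Bool)), Dom_dfs curr graph visited → Pre_dfs curr graph visited → Spec_dfs curr graph visited (dfs curr graph visited)

-- ===== LEMMAS AND PROOFS =====

theorem fcnt_insert_true_le (d : PySem.Dict Int Bool) (k : Int) :
    fcnt (d.insert k true) ≤ fcnt d := by
  unfold fcnt
  by_cases hc : d.contains k = true
  · rw [PySem.Dict.items_insert_of_contains _ _ hc, List.countP_map]
    apply List.countP_mono_left
    intro x hx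
    by_cases hk : x.1 == k <;> simp [hk, Function.comp]
  · rw [PySem.Dict.items_insert_of_not_contains _ _ (by simpa using hc)]
    simp [List.countP_append]


-- the count accumulator of goA is a pure offset
theorem goA_shift (g : PySem.Dict Int (List Int)) (d : Nat) (l : List Int) :
    ∀ vis c, goA g d l vis c = ((goA g d l vis 0).1 + c, (goA g d l vis 0).2) := by
  induction l with
  | nil => intro vis c; rw [goA, goA]; simp
  | cons n rest ih =>
    intro vis c
    by_cases h : (vis.getD n true) = false
    · rw [goA, goA, if_pos h, if_pos h]
      rw [ih _ (c + (dfsA g d n (vis.insert n true)).1),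
          ih _ (0 + (dfsA g d n (vis.insert n true)).1)]
      simp only [Prod.mk.injEq]
      exact ⟨by ring, trivial⟩
    · rw [goA, goA, if_neg h, if_neg h]
      rw [ih vis c, ih vis 0]

-- dfsA / goA never increase the number of False entries
theorem goA_mono_of (g : PySem.Dict Int (List Int)) (d : Nat)
    (hd : ∀ curr vis, fcnt (dfsA g d curr vis).2 ≤ fcnt vis) :
    ∀ l vis c, fcnt (goA g d l vis c).2 ≤ fcnt vis := by
  intro l
  induction l with
  | nil => intro vis c; rw [goA]
  | cons n rest ih =>
    intro vis c
    by_cases h : (vis.getD n true) = false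
    · rw [goA, if_pos h]
      exact le_trans (ih _ _) (le_trans (hd _ _) (fcnt_insert_true_le _ _))
    · rw [goA, if_neg h]; exact ih _ _

theorem dfsA_mono (g : PySem.Dict Int (List Int)) :
    ∀ d curr vis, fcnt (dfsA g d curr vis).2 ≤ fcnt vis := by
  intro d
  induction d with
  | zero => intro curr vis; rw [dfsA]
  | succ d ih =>
    intro curr vis
    rw [dfsA]
    exact le_trans (goA_mono_of g d ih _ _ _) (fcnt_insert_true_le _ _)

theorem goA_mono (g : PySem.Dict Int (List Int)) (d : Nat) :
    ∀ l vis c, fcnt (goA g d l vis c).2 ≤ fcnt vis :=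
  goA_mono_of g d (dfsA_mono g d)

-- one extra unit of fuel changes nothing once fuel dominates the number of False entries
theorem stabA (g : PySem.Dict Int (List Int)) :
    ∀ d : Nat, (∀ curr vis, fcnt vis < d → dfsA g (d+1) curr vis = dfsA g d curr vis) ∧
        (∀ l vis c, fcnt vis ≤ d → goA g (d+1) l vis c = goA g d l vis c) := by
  intro d
  induction d using Nat.strong_induction_on with
  | _ d IH =>
    have hP : ∀ curr vis, fcnt vis < d → dfsA g (d+1) curr vis = dfsA g d curr vis := by
      intro curr vis hlt
      match d, hlt with
      | e+1, hlt =>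
        rw [dfsA, dfsA]
        exact (IH e (by omega)).2 _ _ _ (le_trans (fcnt_insert_true_le _ _) (by omega))
    refine ⟨hP, ?_⟩
    intro l
    induction l with
    | nil => intro vis c _; rw [goA, goA]
    | cons n rest ih =>
      intro vis c hle
      by_cases h : (vis.getD n true) = false
      · have h1 := fcnt_insert_true_lt vis n h
        rw [goA, goA, if_pos h, if_pos h]
        rw [hP _ _ (by omega)]
        have h2 := dfsA_mono g d n (vis.insert n true)
        exact ih _ _ (by omega)
      · rw [goA, goA, if_neg h, if_neg h]; exact ih _ _ hle

theorem goA_stab_ge (g : PySem.Dict Int (List Int)) {d d' : Nat} (l : List Int)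
    (vis : PySem.Dict Int Bool) (c : Int) (hv : fcnt vis ≤ d) (hdd : d ≤ d') :
    goA g d' l vis c = goA g d l vis c := by
  induction d', hdd using Nat.le_induction with
  | base => rfl
  | succ d' hd' ih => rw [(stabA g d').2 l vis c (le_trans hv hd'), ih]

-- the simulation: one stack frame of B accounts for exactly the rest of one of A's for-loops
theorem simB (g : PySem.Dict Int (List Int)) :
    ∀ k : Nat, ∀ w : Nat, ∀ (vis : PySem.Dict Int Bool) (node : Int) (i : Nat)
      (s : List (Int × Nat)) (c : Int), fcnt vis ≤ k → wt g ((node, i) :: s) ≤ w →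
      loopB g ((node, i) :: s) vis c =
        loopB g s (goA g (fcnt vis) ((g.getD node []).drop i) vis 0).2
          (c + (goA g (fcnt vis) ((g.getD node []).drop i) vis 0).1) := by
  intro k
  induction k using Nat.strong_induction_on with
  | _ k IHk =>
    intro w
    induction w with
    | zero =>
      intro vis node i s c hk hw
      exfalso
      simp only [wt, List.map_cons, List.sum_cons] at hw
      omega
    | succ w IHw =>
      intro vis node i s c hk hw
      by_cases hi : i < (g.getD node []).length
      · by_cases hnb : (vis.getD ((g.getD node [])[i]) true) = false
        · -- unvisited neighbor
          have h1 := fcnt_insert_true_lt vis ((g.getD node [])[i]) hnb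
          rw [loopB]
          simp only [dif_pos hi, dif_pos hnb]
          rw [IHk (k-1) (by omega) (wt g (((g.getD node [])[i], 0) :: (node, i+1) :: s))
              (vis.insert ((g.getD node [])[i]) true) ((g.getD node [])[i]) 0 ((node, i+1) :: s)
              (c + 1) (by omega) le_rfl]
          rw [List.drop_zero]
          have hm : fcnt (goA g (fcnt (vis.insert ((g.getD node [])[i]) true))
              (g.getD ((g.getD node [])[i]) []) (vis.insert ((g.getD node [])[i]) true) 0).2
              ≤ fcnt (vis.insert ((g.getD node [])[i]) true) := goA_mono g _ _ _ _
          rw [IHk (k-1) (by omega) (wt g ((node, i+1) :: s))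
              (goA g (fcnt (vis.insert ((g.getD node [])[i]) true))
                (g.getD ((g.getD node [])[i]) []) (vis.insert ((g.getD node [])[i]) true) 0).2
              node (i+1) s
              (c + 1 + (goA g (fcnt (vis.insert ((g.getD node [])[i]) true))
                (g.getD ((g.getD node [])[i]) []) (vis.insert ((g.getD node [])[i]) true) 0).1)
              (by omega) le_rfl]
          -- now rework the right-hand side into the same shape
          obtain ⟨e, he⟩ : ∃ e, fcnt vis = e + 1 := ⟨fcnt vis - 1, by omega⟩
          rw [List.drop_eq_getElem_cons hi, he, goA, if_pos hnb, dfsA,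
              PySem.Dict.insert_insert_self]
          rw [goA_shift g e (g.getD ((g.getD node [])[i]) [])]
          rw [goA_stab_ge g (d := fcnt (vis.insert ((g.getD node [])[i]) true)) (d' := e)
              (g.getD ((g.getD node [])[i]) [])
              (vis.insert ((g.getD node [])[i]) true) 0 le_rfl (by omega)]
          rw [goA_shift g (e+1) (List.drop (i+1) (g.getD node []))]
          rw [goA_stab_ge g
              (d := fcnt (goA g (fcnt (vis.insert ((g.getD node [])[i]) true))
                (g.getD ((g.getD node [])[i]) []) (vis.insert ((g.getD node [])[i]) true) 0).2)
              (d' := e+1)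
              (List.drop (i+1) (g.getD node []))
              (goA g (fcnt (vis.insert ((g.getD node [])[i]) true))
                (g.getD ((g.getD node [])[i]) []) (vis.insert ((g.getD node [])[i]) true) 0).2
              0 le_rfl (by omega)]
          congr 1
          ring
        · -- already-visited neighbor
          rw [loopB]
          simp only [dif_pos hi, dif_neg hnb]
          rw [IHw vis node (i+1) s c hk
              (by simp only [wt, List.map_cons, List.sum_cons] at hw ⊢; omega)]
          rw [List.drop_eq_getElem_cons hi, goA, if_neg hnb]
      · rw [loopB]
        simp only [dif_neg hi]
        rw [List.drop_eq_nil_of_le (by omega), goA]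
        simp

theorem dfs_eq_alt (curr : Int) (graph : List (Int × List Int)) (visited : List (Int × Bool)) :
    dfs curr graph visited = dfs_alt curr graph visited := by
  unfold dfs dfs_alt
  dsimp only
  rw [dfsA]
  rw [goA_shift]
  rw [simB (PySem.Dict.ofList graph) (fcnt ((PySem.Dict.ofList visited).insert curr true))
      (wt (PySem.Dict.ofList graph) [(curr, 0)])
      ((PySem.Dict.ofList visited).insert curr true) curr 0 [] 1 le_rfl le_rfl]
  rw [loopB, List.drop_zero]
  rw [goA_stab_ge (PySem.Dict.ofList graph) ((PySem.Dict.ofList graph).getD curr [])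
      ((PySem.Dict.ofList visited).insert curr true) 0 le_rfl
      (fcnt_insert_true_le (PySem.Dict.ofList visited) curr)]
  ring

-- ===== VERDICT (by name: the statement is the Claim_ definition above) =====
theorem dfs_spec : Claim_equal_dfs := by
  intro curr graph visited _ _
  unfold Spec_dfs
  exact dfs_eq_alt curr graph visited
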